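-- pv_equiv track=rewrite | github.com/ROMAsofthub/WritingSpeedTest | main.py | compare_phrases
-- ===== SOURCE A (Python) =====
-- def compare_phrases(phrase, usr_input):
--   correct_count = 0
--   incorrect_count = 0
--
--   for i in range(len(usr_input)):
--     if i < len(phrase):
--       if usr_input[i] == phrase[i]:
--         correct_count += 1
--       else:
--         incorrect_count += 1
--     else:
--       incorrect_count += 1
--
--   incorrect_count += len(phrase) - len(usr_input)
--
--   return correct_count, incorrect_count
-- ===== SOURCE B (Python) =====
-- def compare_phrases(phrase, usr_input):
--   correct = sum(a == b for a, b in zip(phrase, usr_input))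
--   return correct, len(phrase) - correct
-- ===== Notes on version B (the rewrite author's own statement) =====
-- stated objective: simpler
-- what changed: B computes only the match count over zip(phrase, usr_input) and derives the mismatch count by the closed form len(phrase) - correct, eliminating A's dual-accumulator loop, its i < len(phrase) branch and the tail-length adjustment.
import Mathlib
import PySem

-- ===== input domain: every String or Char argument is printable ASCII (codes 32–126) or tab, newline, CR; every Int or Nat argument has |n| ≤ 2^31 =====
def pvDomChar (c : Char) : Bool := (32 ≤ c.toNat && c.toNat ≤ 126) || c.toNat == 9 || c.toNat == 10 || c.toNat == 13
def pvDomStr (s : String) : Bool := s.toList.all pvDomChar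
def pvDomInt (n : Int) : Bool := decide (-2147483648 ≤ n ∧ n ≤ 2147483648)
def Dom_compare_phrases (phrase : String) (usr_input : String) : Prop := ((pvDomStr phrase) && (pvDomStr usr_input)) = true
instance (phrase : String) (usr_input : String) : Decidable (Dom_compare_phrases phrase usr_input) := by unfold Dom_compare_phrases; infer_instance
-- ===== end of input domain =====

-- B computes only the zip match count and derives mismatches as len(phrase) - correct, replacing A's dual-accumulator indexed loop; objective: simpler.


-- ===== PORT A =====
-- loop over range(len(usr_input)); string indexing u[i]/p[i] is PySem.List.pyGetD on .toList
-- (the index is always in range, so the default is never read)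
def compare_phrases (phrase : String) (usr_input : String) : Int × Int :=
  let counts :=
    (PySem.List.pyRange 0 (PySem.Str.len usr_input) 1).foldl
      (fun (acc : Int × Int) i =>
        if i < PySem.Str.len phrase then
          if PySem.List.pyGetD usr_input.toList i ' ' = PySem.List.pyGetD phrase.toList i ' ' then
            (acc.1 + 1, acc.2)
          else
            (acc.1, acc.2 + 1)
        else
          (acc.1, acc.2 + 1))
      (0, 0)
  (counts.1, counts.2 + (PySem.Str.len phrase - PySem.Str.len usr_input))

-- ===== PORT B =====
def compare_phrases_alt (phrase : String) (usr_input : String) : Int × Int :=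
  let correct : Int := ((phrase.toList.zip usr_input.toList).countP (fun ab => ab.1 == ab.2) : Int)
  (correct, PySem.Str.len phrase - correct)

-- ===== PRECONDITION & SPEC =====
def Spec_compare_phrases (phrase : String) (usr_input : String) (out : Int × Int) : Prop := out = compare_phrases_alt phrase usr_input
instance (phrase : String) (usr_input : String) (out : Int × Int) : Decidable (Spec_compare_phrases phrase usr_input out) := by unfold Spec_compare_phrases; infer_instance

-- ===== CLAIM (what is proved, stated in full; the proofs are below) =====
def Claim_equal_compare_phrases : Prop := ∀ (phrase : String) (usr_input : String), Dom_compare_phrases phrase usr_input → Spec_compare_phrases phrase usr_input (compare_phrases phrase usr_input)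

-- ===== LEMMAS AND PROOFS =====

-- A fold that increments exactly one of two counters per element equals a countP.
theorem foldl_two_counters (L : List Int) (cond : Int → Bool)
    (f : Int × Int → Int → Int × Int)
    (hf : ∀ acc i, f acc i = if cond i then (acc.1 + 1, acc.2) else (acc.1, acc.2 + 1)) :
    ∀ (c ic : Int),
      L.foldl f (c, ic) = (c + (L.countP cond : Int), ic + (L.length : Int) - (L.countP cond : Int)) := by
  induction L with
  | nil => intro c ic; simp
  | cons x xs ih =>
      intro c ic
      have hle := List.countP_le_length (p := cond) (l := xs)
      simp only [List.foldl_cons, hf, List.countP_cons, List.length_cons]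
      by_cases h : cond x = true
      · simp only [h, if_pos, ih, Prod.mk.injEq]
        constructor <;> push_cast <;> ring
      · simp only [h, if_neg, Bool.false_eq_true, not_false_iff, ih, Prod.mk.injEq]
        constructor <;> push_cast <;> ring

-- counting matching indexed positions = counting matching zip pairs
theorem count_range_eq_count_zip (p u : List Char) :
    (List.range u.length).countP
      (fun (k : Nat) => decide ((k : Int) < (p.length : Int)) &&
        (u.getD k ' ' == p.getD k ' '))
    = (p.zip u).countP (fun ab => ab.1 == ab.2) := by
  induction u generalizing p with
  | nil => simp
  | cons b u' ih =>
      cases p with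
      | nil => simp
      | cons a p' =>
          rw [show List.range (b :: u').length = List.range (u'.length + 1) from rfl,
            List.range_succ_eq_map, List.countP_cons, List.countP_map]
          have hcomp : List.countP ((fun (k : Nat) => decide ((k : Int) < (((a :: p').length : Nat) : Int)) &&
                ((b :: u').getD k ' ' == (a :: p').getD k ' ')) ∘ Nat.succ) (List.range u'.length)
              = List.countP (fun (k : Nat) => decide ((k : Int) < (p'.length : Int)) &&
                (u'.getD k ' ' == p'.getD k ' ')) (List.range u'.length) := by
            apply List.countP_congr
            intro k _
            have hk : (((k + 1 : Nat)) : Int) < (((a :: p').length : Nat) : Int) ↔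
                ((k : Nat) : Int) < ((p'.length : Nat) : Int) := by
              push_cast [List.length_cons]; omega
            simp only [Function.comp, Nat.succ_eq_add_one, List.getD_cons_succ, hk]
          rw [hcomp, ih]
          have h' : ¬ (a = b) ↔ ¬ (b = a) := by constructor <;> exact fun h e => h e.symm
          simp only [List.zip_cons_cons, List.countP_cons, List.getD_cons_zero, beq_iff_eq]
          by_cases h : b = a
          · simp [h]
          · simp [h, h'.mpr h]

theorem compare_phrases_eq (phrase usr_input : String) :
    compare_phrases phrase usr_input = compare_phrases_alt phrase usr_input := by
  unfold compare_phrases compare_phrases_alt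
  set p := phrase.toList with hp
  set u := usr_input.toList with hu
  have hlen : ∀ s : String, PySem.Str.len s = (s.toList.length : Int) := fun s => PySem.Str.len_eq s
  set cond : Int → Bool := fun i =>
    decide (i < PySem.Str.len phrase) &&
      (PySem.List.pyGetD u i ' ' == PySem.List.pyGetD p i ' ') with hcond
  have hfold := foldl_two_counters (PySem.List.pyRange 0 (PySem.Str.len usr_input) 1) cond
    (fun (acc : Int × Int) i =>
        if i < PySem.Str.len phrase then
          if PySem.List.pyGetD u i ' ' = PySem.List.pyGetD p i ' ' then
            (acc.1 + 1, acc.2)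
          else
            (acc.1, acc.2 + 1)
        else
          (acc.1, acc.2 + 1))
    (by
      intro acc i
      simp only [hcond, Bool.and_eq_true, decide_eq_true_eq, beq_iff_eq]
      by_cases h1 : i < PySem.Str.len phrase <;>
        by_cases h2 : PySem.List.pyGetD u i ' ' = PySem.List.pyGetD p i ' ' <;>
          simp [h1, h2]) 0 0
  rw [hfold]
  have hcount : (PySem.List.pyRange 0 (PySem.Str.len usr_input) 1).countP cond
      = (p.zip u).countP (fun ab => ab.1 == ab.2) := by
    rw [hlen usr_input, ← hu, PySem.List.pyRange_zero_nat]
    rw [List.countP_map]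
    rw [← count_range_eq_count_zip p u]
    apply List.countP_congr
    intro k _
    simp only [Function.comp, hcond, hlen phrase, ← hp]
    simp [PySem.List.pyGetD_natCast]
  have hlenrange : ((PySem.List.pyRange 0 (PySem.Str.len usr_input) 1).length : Int)
      = (u.length : Int) := by
    rw [hlen usr_input, ← hu, PySem.List.pyRange_zero_nat]; simp
  rw [hcount, hlenrange, hlen phrase, hlen usr_input, ← hp, ← hu]
  have hle : (p.zip u).countP (fun ab => ab.1 == ab.2) ≤ u.length :=
    le_trans List.countP_le_length (by rw [List.length_zip]; omega)
  refine Prod.ext_iff.mpr ⟨by simp, ?_⟩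
  show 0 + (u.length : Int) - _ + ((p.length : Int) - (u.length : Int)) = (p.length : Int) - _
  omega

-- ===== VERDICT (by name: the statement is the Claim_ definition above) =====
theorem compare_phrases_spec : Claim_equal_compare_phrases := by
  intro phrase usr_input _
  exact compare_phrases_eq phrase usr_input
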